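-- pv_equiv track=rewrite | github.com/Michiel29/project747 | dataloaders/dataloader.py | replace_entities_using_ngrams
-- ===== SOURCE A (Python) =====
-- def replace_entities_using_ngrams(sent, entity_dictionary, other_dictionary):
--     ngrams = []
--     all_starts = []
--     start = [j for j in range(len(sent))]
--     for i in range(6, 0, -1):
--         ngrams += zip(*[sent[j:] for j in range(i)])
--         all_starts += zip(*[start[j:] for j in range(i)])
--
--     label_sent = [None] * len(sent)
--     positions_marked = [False for i in range(len(sent))]
--     to_remove = []
--
--     for i, ngram in enumerate(ngrams):
--         word = " ".join(ngram)
--         if word.lower() in entity_dictionary and positions_marked[all_starts[i][0]] == False: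
--             label_sent[all_starts[i][0]] = entity_dictionary[word.lower()]
--             positions_marked[all_starts[i][0]] = True
--             for j in range(1,len(ngram)):
--                 to_remove.append(all_starts[i][j])
--
--         elif word.lower() in other_dictionary and positions_marked[all_starts[i][0]] == False:
--             label_sent[all_starts[i][0]] = other_dictionary[word.lower()]
--             positions_marked[all_starts[i][0]] = True
--             for j in range(1,len(ngram)):
--                 to_remove.append(all_starts[i][j])
--
--     NER_sent = []
--     for index in range(len(sent)):
--         if index not in to_remove:
--             if label_sent[index] is None:
--                 NER_sent.append(sent[index])
--             else:
--                 NER_sent.append(label_sent[index])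
--
--     return NER_sent
-- ===== SOURCE B (Python) =====
-- def replace_entities_using_ngrams(sent, entity_dictionary, other_dictionary):
--     n = len(sent)
--     label = [None] * n
--     removed = set()
--     for s in range(n):
--         for L in range(min(6, n - s), 0, -1):
--             word = " ".join(sent[s:s+L]).lower()
--             if word in entity_dictionary:
--                 val = entity_dictionary[word]
--             elif word in other_dictionary:
--                 val = other_dictionary[word]
--             else:
--                 continue
--             label[s] = val
--             removed.update(range(s + 1, s + L))
--             break
--     return [sent[i] if label[i] is None else label[i]
--             for i in range(n) if i not in removed]
-- ===== Notes on version B (the rewrite author's own statement) =====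
-- stated objective: faster
-- what changed: Instead of materializing all 6..1-gram lists with parallel start-index tuples, a marked array and a to_remove list scanned with 'in' during output, B does one pass over start positions scanning lengths min(6,rest)..1 with an early break per position, and keeps removed interior indices in a set.
import Mathlib
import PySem

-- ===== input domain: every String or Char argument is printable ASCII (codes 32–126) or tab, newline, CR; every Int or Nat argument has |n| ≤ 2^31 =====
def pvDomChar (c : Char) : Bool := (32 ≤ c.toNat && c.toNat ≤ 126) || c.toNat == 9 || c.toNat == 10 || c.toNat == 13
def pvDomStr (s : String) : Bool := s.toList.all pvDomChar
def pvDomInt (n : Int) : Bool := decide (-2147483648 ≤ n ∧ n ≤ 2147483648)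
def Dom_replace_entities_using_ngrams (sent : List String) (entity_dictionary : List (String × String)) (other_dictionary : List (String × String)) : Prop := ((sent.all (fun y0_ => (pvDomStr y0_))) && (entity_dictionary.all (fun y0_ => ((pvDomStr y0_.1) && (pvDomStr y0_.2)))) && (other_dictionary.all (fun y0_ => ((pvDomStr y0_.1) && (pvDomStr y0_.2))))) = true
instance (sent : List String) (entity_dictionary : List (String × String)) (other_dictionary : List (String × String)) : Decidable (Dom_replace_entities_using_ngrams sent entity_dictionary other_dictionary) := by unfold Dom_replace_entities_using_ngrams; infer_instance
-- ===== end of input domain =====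

-- B replaces A's materialized 6..1-gram lists, marked array and to_remove list (scanned with 'in')
-- by a single pass over start positions with a longest-first scan that breaks early, and a set of
-- removed interior indices; same return value, no mutation of the arguments in either program.

-- ===== PORT A =====
-- zip(*[xs[j:] for j in range(i)]) : the list of all i-grams of xs, ported by hand (exact: zip
-- truncates at the shortest slice xs[i-1:], giving the windows starting at 0..len(xs)-i).
def pvWindows {α : Type} (xs : List α) (i : Nat) : List (List α) :=
  (List.range (xs.length + 1 - i)).map (fun s => (xs.drop s).take i)

def replace_entities_using_ngrams (sent : List String) (entity_dictionary : List (String × String)) (other_dictionary : List (String × String)) : List String :=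
  -- start = [j for j in range(len(sent))]  (indices kept as Nat: all Python values here are ≥ 0)
  let start : List Nat := List.range sent.length
  -- for i in range(6, 0, -1): ngrams += …; all_starts += …
  let ngrams : List (List String) :=
    (PySem.List.pyRange 6 0 (-1)).foldl (fun acc i => acc ++ pvWindows sent i.toNat) []
  let all_starts : List (List Nat) :=
    (PySem.List.pyRange 6 0 (-1)).foldl (fun acc i => acc ++ pvWindows start i.toNat) []
  -- for i, ngram in enumerate(ngrams): … all_starts[i] …  — ported as a fold over the zip
  -- (ngrams and all_starts have the same length by construction); the inner loop
  -- 'for j in range(1, len(ngram)): to_remove.append(all_starts[i][j])' appends all_starts[i][1:].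
  let fin : List (Option String) × List Bool × List Nat :=
    (ngrams.zip all_starts).foldl
      (fun (st : List (Option String) × List Bool × List Nat) (p : List String × List Nat) =>
        let word := PySem.Str.lower (PySem.Str.join " " p.1)
        let s0 := p.2.headD 0
        if (PySem.Dict.mk entity_dictionary).contains word ∧ st.2.1.getD s0 false = false then
          (st.1.set s0 (some ((PySem.Dict.mk entity_dictionary).getD word "")),
           st.2.1.set s0 true, st.2.2 ++ p.2.drop 1)
        else if (PySem.Dict.mk other_dictionary).contains word ∧ st.2.1.getD s0 false = false then
          (st.1.set s0 (some ((PySem.Dict.mk other_dictionary).getD word "")),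
           st.2.1.set s0 true, st.2.2 ++ p.2.drop 1)
        else st)
      (List.replicate sent.length none, List.replicate sent.length false, [])
  -- final loop building NER_sent
  (List.range sent.length).foldl
    (fun acc index =>
      if index ∈ fin.2.2 then acc
      else match fin.1.getD index none with
        | none => acc ++ [sent.getD index ""]
        | some v => acc ++ [v])
    []

-- ===== PORT B =====
-- inner 'for L in range(min(6, n-s), 0, -1): … break' of Source B: first matching length, longest first
def pvScan (sent : List String) (ed od : List (String × String)) (s : Nat) : Nat → Option (String × Nat)
  | 0 => none
  | (L+1) =>
    let word := PySem.Str.lower (PySem.Str.join " " ((sent.drop s).take (L+1)))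
    match (PySem.Dict.mk ed).get? word with
    | some v => some (v, L+1)
    | none =>
      match (PySem.Dict.mk od).get? word with
      | some v => some (v, L+1)
      | none => pvScan sent ed od s L

def replace_entities_using_ngrams_alt (sent : List String) (entity_dictionary : List (String × String)) (other_dictionary : List (String × String)) : List String :=
  let n := sent.length
  -- for s in range(n): label[s], removed.update(range(s+1, s+L))  (range(s+1,s+L) = range' (s+1) (L-1))
  let st : List (Option String) × PySem.Set Nat :=
    (List.range n).foldl
      (fun (st : List (Option String) × PySem.Set Nat) s =>
        match pvScan sent entity_dictionary other_dictionary s (min 6 (n - s)) with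
        | some (v, L) => (st.1.set s (some v), PySem.Set.update st.2 (List.range' (s+1) (L-1)))
        | none => st)
      (List.replicate n none, PySem.Set.empty)
  -- [sent[i] if label[i] is None else label[i] for i in range(n) if i not in removed]
  (List.range n).filterMap
    (fun i =>
      if PySem.Set.contains st.2 i then none
      else some ((st.1.getD i none).getD (sent.getD i "")))

-- ===== PRECONDITION & SPEC =====
def Spec_replace_entities_using_ngrams (sent : List String) (entity_dictionary : List (String × String)) (other_dictionary : List (String × String)) (out : List String) : Prop := out = replace_entities_using_ngrams_alt sent entity_dictionary other_dictionary
instance (sent : List String) (entity_dictionary : List (String × String)) (other_dictionary : List (String × String)) (out : List String) : Decidable (Spec_replace_entities_using_ngrams sent entity_dictionary other_dictionary out) := by unfold Spec_replace_entities_using_ngrams; infer_instance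

-- ===== CLAIM (what is proved, stated in full; the proofs are below) =====
def Claim_equal_replace_entities_using_ngrams : Prop := ∀ (sent : List String) (entity_dictionary : List (String × String)) (other_dictionary : List (String × String)), Dom_replace_entities_using_ngrams sent entity_dictionary other_dictionary → Spec_replace_entities_using_ngrams sent entity_dictionary other_dictionary (replace_entities_using_ngrams sent entity_dictionary other_dictionary)

-- ===== LEMMAS AND PROOFS =====

-- the dictionary hit at start s, length L: entity first, then other (both programs use this value)
def pvHit (sent : List String) (ed od : List (String × String)) (s L : Nat) : Option String :=
  let word := PySem.Str.lower (PySem.Str.join " " ((sent.drop s).take L))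
  match (PySem.Dict.mk ed).get? word with
  | some v => some v
  | none => (PySem.Dict.mk od).get? word

-- first hit along a list of candidate lengths
def pvFirst (sent : List String) (ed od : List (String × String)) (s : Nat) : List Nat → Option (String × Nat)
  | [] => none
  | L :: ls =>
    match pvHit sent ed od s L with
    | some v => some (v, L)
    | none => pvFirst sent ed od s ls

-- [k, k-1, ..., 1]
def pvDesc : Nat → List Nat
  | 0 => []
  | (k+1) => (k+1) :: pvDesc k

-- A's loop body, abstracted to act on the (start, length) pair
def pvStep (sent : List String) (ed od : List (String × String))
    (st : List (Option String) × List Bool × List Nat) (p : Nat × Nat) :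
    List (Option String) × List Bool × List Nat :=
  if (pvHit sent ed od p.1 p.2).isSome ∧ st.2.1.getD p.1 false = false then
    (st.1.set p.1 (pvHit sent ed od p.1 p.2), st.2.1.set p.1 true,
     st.2.2 ++ List.range' (p.1+1) (p.2-1))
  else st

-- the (start, length) pairs in A's processing order: lengths 6..1, starts ascending within a length
def pvPairs (n : Nat) : List (Nat × Nat) :=
  ([6,5,4,3,2,1] : List Nat).flatMap (fun L => (List.range (n + 1 - L)).map (fun s => (s, L)))

-- the lengths tried at start s, in A's order
def pvLs (ps : List (Nat × Nat)) (s : Nat) : List Nat := (ps.filter (fun p => p.1 == s)).map (·.2)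

-- the label both programs assign at position i, and the removed-interior test
def pvLab (sent : List String) (ed od : List (String × String)) (i : Nat) : Option String :=
  match pvScan sent ed od i (min 6 (sent.length - i)) with
  | some (v, _) => some v
  | none => none

def pvRemB (sent : List String) (ed od : List (String × String)) (i : Nat) : Bool :=
  (List.range sent.length).any (fun s =>
    match pvScan sent ed od s (min 6 (sent.length - s)) with
    | some (_, L) => decide (s + 1 ≤ i ∧ i < s + L)
    | none => false)

theorem pv_getD_set {α : Type} (l : List α) (t s : Nat) (x d : α) :
    (l.set t x).getD s d = if t = s ∧ t < l.length then x else l.getD s d := by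
  simp only [List.getD_eq_getElem?_getD, List.getElem?_set]
  split_ifs with h1 h2 h3 <;> simp_all
  omega

theorem pvLs_cons (p : Nat × Nat) (ps : List (Nat × Nat)) (s : Nat) :
    pvLs (p :: ps) s = if p.1 = s then p.2 :: pvLs ps s else pvLs ps s := by
  simp only [pvLs, List.filter_cons]
  split_ifs with h1 h2 h3 <;> simp_all

theorem pv_scan_eq_first (sent : List String) (ed od : List (String × String)) (s : Nat) :
    ∀ k, pvScan sent ed od s k = pvFirst sent ed od s (pvDesc k) := by
  intro k
  induction k with
  | zero => rfl
  | succ L ih =>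
    simp only [pvScan, pvDesc, pvFirst, pvHit]
    cases h1 : (PySem.Dict.mk ed).get? (PySem.Str.lower (PySem.Str.join " " ((sent.drop s).take (L+1)))) with
    | some v => rfl
    | none =>
      cases h2 : (PySem.Dict.mk od).get? (PySem.Str.lower (PySem.Str.join " " ((sent.drop s).take (L+1)))) with
      | some v => rfl
      | none => exact ih

theorem pv_fold_char (sent : List String) (ed od : List (String × String)) :
    ∀ (ps : List (Nat × Nat)) (n : Nat) (label : List (Option String)) (marked : List Bool) (rem : List Nat),
      label.length = n → marked.length = n → (∀ p ∈ ps, p.1 < n) →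
      (∀ s,
        ((ps.foldl (pvStep sent ed od) (label, marked, rem)).2.1.getD s false
            = (marked.getD s false || (pvFirst sent ed od s (pvLs ps s)).isSome))
        ∧ ((ps.foldl (pvStep sent ed od) (label, marked, rem)).1.getD s none
            = if marked.getD s false then label.getD s none
              else match pvFirst sent ed od s (pvLs ps s) with
                   | some (v, _) => some v
                   | none => label.getD s none))
      ∧ (∀ i, i ∈ (ps.foldl (pvStep sent ed od) (label, marked, rem)).2.2 ↔
          i ∈ rem ∨ ∃ s v L, marked.getD s false = false
            ∧ pvFirst sent ed od s (pvLs ps s) = some (v, L) ∧ s + 1 ≤ i ∧ i < s + L) := by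
  intro ps
  induction ps with
  | nil =>
    intro n label marked rem hl hm _
    refine ⟨fun s => ⟨by simp [pvLs, pvFirst], ?_⟩, fun i => ?_⟩
    · simp only [List.foldl_nil, pvLs, List.filter_nil, List.map_nil, pvFirst]
      split <;> rfl
    · simp [pvLs, pvFirst]
  | cons p ps ih =>
    intro n label marked rem hl hm hmem
    have htn : p.1 < n := hmem p (List.mem_cons_self)
    simp only [List.foldl_cons]
    by_cases hcond : (pvHit sent ed od p.1 p.2).isSome ∧ marked.getD p.1 false = false
    · -- match taken at p
      obtain ⟨hhit, hmk⟩ := hcond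
      obtain ⟨v0, hv0⟩ := Option.isSome_iff_exists.mp hhit
      have hstep : pvStep sent ed od (label, marked, rem) p =
          (label.set p.1 (pvHit sent ed od p.1 p.2), marked.set p.1 true,
           rem ++ List.range' (p.1+1) (p.2-1)) := by
        simp only [pvStep]
        rw [if_pos ⟨hhit, hmk⟩]
      rw [hstep]
      obtain ⟨IH1, IH2⟩ := ih n (label.set p.1 (pvHit sent ed od p.1 p.2)) (marked.set p.1 true)
        (rem ++ List.range' (p.1+1) (p.2-1)) (by simpa using hl) (by simpa using hm)
        (fun q hq => hmem q (List.mem_cons_of_mem _ hq))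
      have hlenm : p.1 < marked.length := by omega
      have hlenl : p.1 < label.length := by omega
      have hms : (marked.set p.1 true).getD p.1 false = true := by
        rw [pv_getD_set]; exact if_pos ⟨rfl, hlenm⟩
      have hls : (label.set p.1 (pvHit sent ed od p.1 p.2)).getD p.1 none = some v0 := by
        rw [pv_getD_set, hv0]; exact if_pos ⟨rfl, hlenl⟩
      have hmsne : ∀ s, p.1 ≠ s → (marked.set p.1 true).getD s false = marked.getD s false := by
        intro s hts; rw [pv_getD_set]; exact if_neg (fun h => hts h.1)
      have hlsne : ∀ s, p.1 ≠ s →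
          (label.set p.1 (pvHit sent ed od p.1 p.2)).getD s none = label.getD s none := by
        intro s hts; rw [pv_getD_set]; exact if_neg (fun h => hts h.1)
      constructor
      · intro s
        obtain ⟨IHm, IHl⟩ := IH1 s
        rw [pvLs_cons]
        by_cases hts : p.1 = s
        · subst hts
          rw [if_pos rfl]
          constructor
          · rw [IHm, hms, hmk]
            simp [pvFirst, hv0]
          · rw [IHl, hms, hls, hmk]
            simp [pvFirst, hv0]
        · rw [if_neg hts]
          constructor
          · rw [IHm, hmsne s hts]
          · rw [IHl, hmsne s hts, hlsne s hts]
      · intro i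
        rw [IH2 i]
        constructor
        · rintro (hi | ⟨s, v, L, hmks, hfst, hlo, hhi⟩)
          · rw [List.mem_append] at hi
            rcases hi with hi | hi
            · exact Or.inl hi
            · obtain ⟨h1, h2⟩ := List.mem_range'_1.mp hi
              refine Or.inr ⟨p.1, v0, p.2, hmk, ?_, h1, by omega⟩
              rw [pvLs_cons, if_pos rfl]; simp [pvFirst, hv0]
          · have hts : p.1 ≠ s := by
              intro h; subst h
              rw [hms] at hmks; exact absurd hmks (by decide)
            rw [hmsne s hts] at hmks
            refine Or.inr ⟨s, v, L, hmks, ?_, hlo, hhi⟩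
            rw [pvLs_cons, if_neg hts]; exact hfst
        · rintro (hi | ⟨s, v, L, hmks, hfst, hlo, hhi⟩)
          · exact Or.inl (List.mem_append.mpr (Or.inl hi))
          · by_cases hts : p.1 = s
            · subst hts
              rw [pvLs_cons, if_pos rfl] at hfst
              simp only [pvFirst, hv0] at hfst
              have h12 : v0 = v ∧ p.2 = L := by simpa using hfst
              obtain ⟨rfl, rfl⟩ := h12
              refine Or.inl (List.mem_append.mpr (Or.inr ?_))
              rw [List.mem_range'_1]
              exact ⟨hlo, by omega⟩
            · refine Or.inr ⟨s, v, L, ?_, ?_, hlo, hhi⟩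
              · rw [hmsne s hts]; exact hmks
              · rw [pvLs_cons, if_neg hts] at hfst; exact hfst
    · -- no state change at p
      have hstep : pvStep sent ed od (label, marked, rem) p = (label, marked, rem) := by
        simp only [pvStep, if_neg hcond]
      rw [hstep]
      obtain ⟨IH1, IH2⟩ := ih n label marked rem hl hm
        (fun q hq => hmem q (List.mem_cons_of_mem _ hq))
      have hfirst : ∀ s, marked.getD s false = false →
          pvFirst sent ed od s (pvLs (p :: ps) s) = pvFirst sent ed od s (pvLs ps s) := by
        intro s hmks
        rw [pvLs_cons]
        by_cases hts : p.1 = s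
        · subst hts
          rw [if_pos rfl]
          have hhitnone : pvHit sent ed od p.1 p.2 = none := by
            rcases h : pvHit sent ed od p.1 p.2 with _ | v
            · rfl
            · exact absurd ⟨by simp [h], hmks⟩ hcond
          simp [pvFirst, hhitnone]
        · rw [if_neg hts]
      constructor
      · intro s
        obtain ⟨IHm, IHl⟩ := IH1 s
        by_cases hmks : marked.getD s false = false
        · rw [IHm, IHl, hfirst s hmks]
          exact ⟨rfl, rfl⟩
        · have hmt : marked.getD s false = true := by
            cases h : marked.getD s false
            · exact absurd h hmks
            · rfl
          rw [IHm, IHl, hmt]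
          simp
      · intro i
        rw [IH2 i]
        constructor
        · rintro (hi | ⟨s, v, L, hmks, hfst, hlo, hhi⟩)
          · exact Or.inl hi
          · exact Or.inr ⟨s, v, L, hmks, by rw [hfirst s hmks]; exact hfst, hlo, hhi⟩
        · rintro (hi | ⟨s, v, L, hmks, hfst, hlo, hhi⟩)
          · exact Or.inl hi
          · exact Or.inr ⟨s, v, L, hmks, by rw [← hfirst s hmks]; exact hfst, hlo, hhi⟩

theorem take_range'_aux (s L k : Nat) : List.take L (List.range' s (L + k)) = List.range' s L := by
  have h := @List.range'_append s L k 1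
  rw [← h, List.take_append_of_le_length (by simp), List.take_of_length_le (by simp)]

theorem pv_windows_range (n L : Nat) :
    pvWindows (List.range n) L = (List.range (n + 1 - L)).map (fun s => List.range' s L) := by
  unfold pvWindows
  rw [List.length_range]
  apply List.map_congr_left
  intro s hs
  rw [List.mem_range] at hs
  have h1 : (List.range n).drop s = List.range' s (n - s) := by
    simp [List.range_eq_range', List.drop_range']
  rw [h1]
  have h2 : n - s = L + (n - s - L) := by omega
  rw [h2, take_range'_aux]

theorem pv_zip_decomp (sent : List String) :
    ((PySem.List.pyRange 6 0 (-1)).foldl (fun acc i => acc ++ pvWindows sent i.toNat) []).zip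
      ((PySem.List.pyRange 6 0 (-1)).foldl (fun acc i => acc ++ pvWindows (List.range sent.length) i.toNat) [])
    = (pvPairs sent.length).map (fun p => ((sent.drop p.1).take p.2, List.range' p.1 p.2)) := by
  have hr : PySem.List.pyRange 6 0 (-1) = [6,5,4,3,2,1] := by decide
  rw [hr]
  simp only [List.foldl_cons, List.foldl_nil, List.nil_append]
  simp only [show ((6:Int).toNat) = 6 from rfl, show ((5:Int).toNat) = 5 from rfl,
    show ((4:Int).toNat) = 4 from rfl, show ((3:Int).toNat) = 3 from rfl,
    show ((2:Int).toNat) = 2 from rfl, show ((1:Int).toNat) = 1 from rfl]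
  have hlen : ∀ L : Nat, (pvWindows sent L).length = (pvWindows (List.range sent.length) L).length := by
    intro L; simp [pvWindows]
  simp only [List.append_assoc]
  rw [List.zip_append (hlen 6), List.zip_append (hlen 5), List.zip_append (hlen 4),
      List.zip_append (hlen 3), List.zip_append (hlen 2)]
  have hgroup : ∀ L : Nat, (pvWindows sent L).zip (pvWindows (List.range sent.length) L)
      = ((List.range (sent.length + 1 - L)).map (fun s => (s, L))).map
          (fun p => ((sent.drop p.1).take p.2, List.range' p.1 p.2)) := by
    intro L
    rw [pv_windows_range]
    unfold pvWindows
    rw [List.zip_map', List.map_map]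
    rfl
  simp only [pvPairs, List.flatMap_cons, List.flatMap_nil, List.append_nil, List.map_append]
  rw [hgroup 6, hgroup 5, hgroup 4, hgroup 3, hgroup 2, hgroup 1]

theorem pv_mem_pairs (n : Nat) (p : Nat × Nat) (hp : p ∈ pvPairs n) :
    1 ≤ p.2 ∧ p.2 ≤ 6 ∧ p.1 + p.2 ≤ n := by
  simp only [pvPairs, List.mem_flatMap, List.mem_map, List.mem_range, List.mem_cons,
    List.not_mem_nil, or_false] at hp
  obtain ⟨L, hL, s, hs, heq⟩ := hp
  cases heq
  rcases hL with rfl | rfl | rfl | rfl | rfl | rfl <;> (simp only; omega)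

theorem pv_range_filter_eq (m s : Nat) :
    (List.range m).filter (fun x => x == s) = if s < m then [s] else [] := by
  induction m with
  | zero => simp
  | succ k ih =>
    rw [List.range_succ, List.filter_append, ih]
    by_cases h : s < k
    · rw [if_pos h, if_pos (by omega)]
      have : k ≠ s := by omega
      simp [this]
    · rw [if_neg h]
      by_cases h2 : s = k
      · subst h2; rw [if_pos (by omega)]; simp
      · rw [if_neg (by omega)]; simp [Ne.symm h2]

theorem pv_first_ls (sent : List String) (ed od : List (String × String)) (n s : Nat) :
    pvFirst sent ed od s (pvLs (pvPairs n) s) = pvFirst sent ed od s (pvDesc (min 6 (n - s))) := by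
  have hgrp : ∀ L : Nat, 1 ≤ L →
      ((((List.range (n + 1 - L)).map (fun s' => (s', L))).filter (fun p => p.1 == s)).map (·.2))
        = if s + L ≤ n then [L] else [] := by
    intro L hL
    rw [List.filter_map, List.map_map]
    have : ((fun p : Nat × Nat => p.1 == s) ∘ fun s' => (s', L)) = fun x => x == s := rfl
    rw [this, pv_range_filter_eq]
    by_cases h : s < n + 1 - L
    · rw [if_pos h, if_pos (by omega)]; rfl
    · rw [if_neg h, if_neg (by omega)]; rfl
  simp only [pvLs, pvPairs, List.flatMap_cons, List.flatMap_nil, List.append_nil,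
    List.filter_append, List.map_append]
  rw [hgrp 6 (by omega)]
  rw [hgrp 5 (by omega)]
  rw [hgrp 4 (by omega)]
  rw [hgrp 3 (by omega)]
  rw [hgrp 2 (by omega)]
  rw [hgrp 1 (by omega)]
  obtain ⟨m, hm⟩ : ∃ m, min 6 (n - s) = m := ⟨_, rfl⟩
  rw [hm]
  have hm6 : m ≤ 6 := by omega
  simp only [show (s + 6 ≤ n) = (6 ≤ m) from propext (by omega),
    show (s + 5 ≤ n) = (5 ≤ m) from propext (by omega),
    show (s + 4 ≤ n) = (4 ≤ m) from propext (by omega),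
    show (s + 3 ≤ n) = (3 ≤ m) from propext (by omega),
    show (s + 2 ≤ n) = (2 ≤ m) from propext (by omega),
    show (s + 1 ≤ n) = (1 ≤ m) from propext (by omega)]
  interval_cases m <;> rfl

theorem pv_fold_charB (sent : List String) (ed od : List (String × String)) (n : Nat) :
    ∀ (k a : Nat) (label : List (Option String)) (rm : PySem.Set Nat),
      label.length = n → a + k ≤ n →
      (∀ s, ((List.range' a k).foldl
          (fun (st : List (Option String) × PySem.Set Nat) s =>
            match pvScan sent ed od s (min 6 (n - s)) with
            | some (v, L) => (st.1.set s (some v), PySem.Set.update st.2 (List.range' (s+1) (L-1)))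
            | none => st) (label, rm)).1.getD s none =
        if a ≤ s ∧ s < a + k then
          (match pvScan sent ed od s (min 6 (n - s)) with
           | some (v, _) => some v
           | none => label.getD s none)
        else label.getD s none)
      ∧ (∀ i, i ∈ ((List.range' a k).foldl
          (fun (st : List (Option String) × PySem.Set Nat) s =>
            match pvScan sent ed od s (min 6 (n - s)) with
            | some (v, L) => (st.1.set s (some v), PySem.Set.update st.2 (List.range' (s+1) (L-1)))
            | none => st) (label, rm)).2 ↔
          i ∈ rm ∨ ∃ s v L, a ≤ s ∧ s < a + k
            ∧ pvScan sent ed od s (min 6 (n - s)) = some (v, L) ∧ s + 1 ≤ i ∧ i < s + L) := by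
  intro k
  induction k with
  | zero =>
    intro a label rm hl ha
    constructor
    · intro s
      rw [if_neg (by omega)]
      rfl
    · intro i
      simp only [List.range'_zero, List.foldl_nil]
      constructor
      · exact fun h => Or.inl h
      · rintro (h | ⟨s, v, L, h1, h2, _⟩)
        · exact h
        · omega
  | succ k ih =>
    intro a label rm hl ha
    rw [List.range'_succ]
    simp only [List.foldl_cons]
    cases hsc : pvScan sent ed od a (min 6 (n - a)) with
    | none =>
      obtain ⟨IH1, IH2⟩ := ih (a+1) label rm hl (by omega)
      constructor
      · intro s
        rw [IH1 s]
        by_cases hsa : s = a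
        · subst hsa
          rw [if_neg (by omega), if_pos (by omega), hsc]
        · by_cases hr : a + 1 ≤ s ∧ s < a + 1 + k
          · rw [if_pos hr, if_pos (by omega)]
          · rw [if_neg hr, if_neg (by omega)]
      · intro i
        rw [IH2 i]
        constructor
        · rintro (h | ⟨s, v, L, h1, h2, h3, h4, h5⟩)
          · exact Or.inl h
          · exact Or.inr ⟨s, v, L, by omega, by omega, h3, h4, h5⟩
        · rintro (h | ⟨s, v, L, h1, h2, h3, h4, h5⟩)
          · exact Or.inl h
          · have hsa : s ≠ a := fun he => by rw [he, hsc] at h3; cases h3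
            exact Or.inr ⟨s, v, L, by omega, by omega, h3, h4, h5⟩
    | some vl =>
      obtain ⟨v0, L0⟩ := vl
      obtain ⟨IH1, IH2⟩ := ih (a+1) (label.set a (some v0))
        (PySem.Set.update rm (List.range' (a+1) (L0-1))) (by simpa using hl) (by omega)
      constructor
      · intro s
        rw [IH1 s]
        by_cases hsa : s = a
        · subst hsa
          rw [if_neg (by omega), if_pos (by omega), hsc, pv_getD_set,
              if_pos ⟨rfl, by omega⟩]
        · have hne : (label.set a (some v0)).getD s none = label.getD s none := by
            rw [pv_getD_set]; exact if_neg (fun h => hsa h.1.symm)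
          by_cases hr : a + 1 ≤ s ∧ s < a + 1 + k
          · rw [if_pos hr, if_pos (by omega), hne]
          · rw [if_neg hr, if_neg (by omega), hne]
      · intro i
        rw [IH2 i, PySem.Set.mem_update]
        constructor
        · rintro ((h | h) | ⟨s, v, L, h1, h2, h3, h4, h5⟩)
          · exact Or.inl h
          · obtain ⟨hlo, hhi⟩ := List.mem_range'_1.mp h
            exact Or.inr ⟨a, v0, L0, by omega, by omega, hsc, hlo, by omega⟩
          · exact Or.inr ⟨s, v, L, by omega, by omega, h3, h4, h5⟩
        · rintro (h | ⟨s, v, L, h1, h2, h3, h4, h5⟩)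
          · exact Or.inl (Or.inl h)
          · by_cases hsa : s = a
            · subst hsa
              rw [hsc] at h3
              have h12 : v0 = v ∧ L0 = L := by simpa using h3
              obtain ⟨rfl, rfl⟩ := h12
              refine Or.inl (Or.inr ?_)
              rw [List.mem_range'_1]
              exact ⟨h4, by omega⟩
            · exact Or.inr ⟨s, v, L, by omega, by omega, h3, h4, h5⟩

theorem pv_out_foldA (rem : List Nat) (lab : List (Option String)) (sent : List String) :
    ∀ (l : List Nat) (acc : List String),
      l.foldl (fun acc index =>
        if index ∈ rem then acc
        else match lab.getD index none with
          | none => acc ++ [sent.getD index ""]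
          | some v => acc ++ [v]) acc
      = acc ++ l.filterMap (fun index =>
          if index ∈ rem then none
          else some (match lab.getD index none with
            | none => sent.getD index ""
            | some v => v)) := by
  intro l
  induction l with
  | nil => intro acc; simp
  | cons x xs ih =>
    intro acc
    simp only [List.foldl_cons, List.filterMap_cons]
    by_cases hx : x ∈ rem
    · rw [if_pos hx, if_pos hx, ih]
    · rw [if_neg hx, if_neg hx, ih]
      cases h : lab.getD x none <;> simp [List.append_assoc]

theorem pv_scan_lt (sent : List String) (ed od : List (String × String)) (s : Nat) (v : String) (L : Nat)
    (h : pvScan sent ed od s (min 6 (sent.length - s)) = some (v, L)) : s < sent.length := by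
  by_contra hge
  have h0 : min 6 (sent.length - s) = 0 := by omega
  rw [h0] at h
  simp [pvScan] at h

theorem pvRemB_iff (sent : List String) (ed od : List (String × String)) (i : Nat) :
    pvRemB sent ed od i = true ↔ ∃ s v L,
      pvScan sent ed od s (min 6 (sent.length - s)) = some (v, L) ∧ s + 1 ≤ i ∧ i < s + L := by
  unfold pvRemB
  rw [List.any_eq_true]
  constructor
  · rintro ⟨s, hs, h⟩
    cases hsc : pvScan sent ed od s (min 6 (sent.length - s)) with
    | none => rw [hsc] at h; simp at h
    | some vl =>
      obtain ⟨v, L⟩ := vl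
      rw [hsc] at h
      simp only [decide_eq_true_eq] at h
      exact ⟨s, v, L, hsc, h.1, h.2⟩
  · rintro ⟨s, v, L, hsc, h4, h5⟩
    refine ⟨s, List.mem_range.mpr (pv_scan_lt sent ed od s v L hsc), ?_⟩
    rw [hsc]
    simp only [decide_eq_true_eq]
    exact ⟨h4, h5⟩

theorem pv_stepA_eq (sent : List String) (ed od : List (String × String))
    (st : List (Option String) × List Bool × List Nat) (p : Nat × Nat) (hp1 : 1 ≤ p.2) :
    (let word := PySem.Str.lower (PySem.Str.join " " ((sent.drop p.1).take p.2))
     let s0 := (List.range' p.1 p.2).headD 0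
     if (PySem.Dict.mk ed).contains word ∧ st.2.1.getD s0 false = false then
       (st.1.set s0 (some ((PySem.Dict.mk ed).getD word "")),
        st.2.1.set s0 true, st.2.2 ++ (List.range' p.1 p.2).drop 1)
     else if (PySem.Dict.mk od).contains word ∧ st.2.1.getD s0 false = false then
       (st.1.set s0 (some ((PySem.Dict.mk od).getD word "")),
        st.2.1.set s0 true, st.2.2 ++ (List.range' p.1 p.2).drop 1)
     else st)
    = pvStep sent ed od st p := by
  have hk : p.2 - 1 + 1 = p.2 := by omega
  have hr : List.range' p.1 p.2 = p.1 :: List.range' (p.1 + 1) (p.2 - 1) := by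
    conv_lhs => rw [← hk]
    rw [List.range'_succ]
  simp only [hr, List.headD_cons, List.drop_succ_cons, List.drop_zero]
  simp only [PySem.Dict.contains_eq_isSome_get?]
  by_cases hmk : st.2.1.getD p.1 false = false <;>
  cases h1 : (PySem.Dict.mk ed).get? (PySem.Str.lower (PySem.Str.join " " ((sent.drop p.1).take p.2))) <;>
  cases h2 : (PySem.Dict.mk od).get? (PySem.Str.lower (PySem.Str.join " " ((sent.drop p.1).take p.2))) <;>
  (simp only [List.getD_eq_getElem?_getD] at hmk; simp [pvStep, pvHit, h1, h2, hmk, PySem.Dict.getD])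

theorem pvA_char (sent : List String) (ed od : List (String × String)) :
    replace_entities_using_ngrams sent ed od
      = (List.range sent.length).filterMap (fun i =>
          if pvRemB sent ed od i then none
          else some ((pvLab sent ed od i).getD (sent.getD i ""))) := by
  simp only [replace_entities_using_ngrams]
  rw [pv_zip_decomp, List.foldl_map]
  rw [PySem.List.foldl_congr_mem (pvPairs sent.length) _ (pvStep sent ed od)
      (List.replicate sent.length none, List.replicate sent.length false, [])
      (fun acc p hp => pv_stepA_eq sent ed od acc p (pv_mem_pairs sent.length p hp).1)]
  obtain ⟨H1, H2⟩ := pv_fold_char sent ed od (pvPairs sent.length) sent.length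
    (List.replicate sent.length none) (List.replicate sent.length false) []
    (List.length_replicate) (List.length_replicate)
    (fun p hp => by have := pv_mem_pairs sent.length p hp; omega)
  rw [pv_out_foldA]
  rw [List.nil_append]
  apply List.filterMap_congr
  intro i _
  have hrepl_b : ∀ s, (List.replicate sent.length false).getD s false = false := by
    intro s; simp only [List.getD_eq_getElem?_getD, List.getElem?_replicate]
    split <;> rfl
  have hrepl_n : ∀ s, (List.replicate sent.length (none : Option String)).getD s none = none := by
    intro s; simp only [List.getD_eq_getElem?_getD, List.getElem?_replicate]
    split <;> rfl
  have hfst : ∀ s, pvFirst sent ed od s (pvLs (pvPairs sent.length) s)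
      = pvScan sent ed od s (min 6 (sent.length - s)) := by
    intro s
    rw [pv_first_ls, ← pv_scan_eq_first]
  have hcond : (i ∈ (List.foldl (pvStep sent ed od)
      (List.replicate sent.length none, List.replicate sent.length false, [])
      (pvPairs sent.length)).2.2) ↔ pvRemB sent ed od i = true := by
    rw [H2 i, pvRemB_iff]
    simp only [List.not_mem_nil, false_or, hrepl_b, true_and, hfst]
  have hlab : (List.foldl (pvStep sent ed od)
      (List.replicate sent.length none, List.replicate sent.length false, [])
      (pvPairs sent.length)).1.getD i none = pvLab sent ed od i := by
    rw [(H1 i).2, hrepl_b, hrepl_n, if_neg (by simp), hfst, pvLab]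
  by_cases hc : pvRemB sent ed od i = true
  · rw [if_pos (hcond.mpr hc), if_pos hc]
  · rw [if_neg (fun h => hc (hcond.mp h)), if_neg hc, hlab]
    cases pvLab sent ed od i <;> rfl

theorem pvB_char (sent : List String) (ed od : List (String × String)) :
    replace_entities_using_ngrams_alt sent ed od
      = (List.range sent.length).filterMap (fun i =>
          if pvRemB sent ed od i then none
          else some ((pvLab sent ed od i).getD (sent.getD i ""))) := by
  simp only [replace_entities_using_ngrams_alt]
  obtain ⟨H1, H2⟩ := pv_fold_charB sent ed od sent.length sent.length 0
    (List.replicate sent.length none) PySem.Set.empty (List.length_replicate) (by omega)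
  rw [← List.range_eq_range'] at H1 H2
  apply List.filterMap_congr
  intro i hi
  rw [List.mem_range] at hi
  have hrepl_n : (List.replicate sent.length (none : Option String)).getD i none = none := by
    simp only [List.getD_eq_getElem?_getD, List.getElem?_replicate]
    split <;> rfl
  have hcond : PySem.Set.contains ((List.range sent.length).foldl
      (fun (st : List (Option String) × PySem.Set Nat) s =>
        match pvScan sent ed od s (min 6 (sent.length - s)) with
        | some (v, L) => (st.1.set s (some v), PySem.Set.update st.2 (List.range' (s+1) (L-1)))
        | none => st) (List.replicate sent.length none, PySem.Set.empty)).2 i = pvRemB sent ed od i := by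
    rcases hb : pvRemB sent ed od i with _ | _
    · rcases hc : PySem.Set.contains _ i with _ | _
      · rfl
      · exfalso
        have hmem := (PySem.Set.contains_iff _ i).mp hc
        rw [H2 i] at hmem
        rcases hmem with h | ⟨s, v, L, _, _, h3, h4, h5⟩
        · simp [PySem.Set.empty] at h
        · have : pvRemB sent ed od i = true := (pvRemB_iff sent ed od i).mpr ⟨s, v, L, h3, h4, h5⟩
          rw [hb] at this; cases this
    · apply (PySem.Set.contains_iff _ i).mpr
      rw [H2 i]
      obtain ⟨s, v, L, h3, h4, h5⟩ := (pvRemB_iff sent ed od i).mp hb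
      exact Or.inr ⟨s, v, L, by omega, by
        have := pv_scan_lt sent ed od s v L h3; omega, h3, h4, h5⟩
  have hlab : ((List.range sent.length).foldl
      (fun (st : List (Option String) × PySem.Set Nat) s =>
        match pvScan sent ed od s (min 6 (sent.length - s)) with
        | some (v, L) => (st.1.set s (some v), PySem.Set.update st.2 (List.range' (s+1) (L-1)))
        | none => st) (List.replicate sent.length none, PySem.Set.empty)).1.getD i none
      = pvLab sent ed od i := by
    rw [H1 i, if_pos ⟨by omega, by omega⟩, hrepl_n, pvLab]
  rw [hcond, hlab]

-- ===== VERDICT (by name: the statement is the Claim_ definition above) =====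
theorem replace_entities_using_ngrams_spec : Claim_equal_replace_entities_using_ngrams := by
  intro sent ed od _
  unfold Spec_replace_entities_using_ngrams
  rw [pvA_char, pvB_char]
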